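-- pv_equiv track=rewrite | github.com/heldersepu/hs-scripts | Python/codility/BinaryGap.py | solution
-- ===== SOURCE A (Python) =====
-- def solution(n):
--     max = 0
--     count = 0
--     bin = format(n, 'b')
--     for i in bin:
--         if i == "0":
--             count += 1
--         else:
--             if count > max:
--                 max = count
--             count = 0
--     return max
-- ===== SOURCE B (Python) =====
-- def solution(n):
--     # Binary digits with the sign and the trailing zeros stripped; the zero runs
--     # strictly between ones are exactly the groups of s.split('1').
--     s = format(n, 'b').strip('-0')
--     return max((len(g) for g in s.split('1')), default=0)
-- ===== Notes on version B (the rewrite author's own statement) =====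
-- stated objective: idiomatic
-- what changed: Replaced A's single-pass max/count state machine over the binary digits by a partition-then-reduce: strip the sign and the trailing zeros from format(n,'b') and take the maximum length of the groups produced by splitting on '1'.
import Mathlib
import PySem

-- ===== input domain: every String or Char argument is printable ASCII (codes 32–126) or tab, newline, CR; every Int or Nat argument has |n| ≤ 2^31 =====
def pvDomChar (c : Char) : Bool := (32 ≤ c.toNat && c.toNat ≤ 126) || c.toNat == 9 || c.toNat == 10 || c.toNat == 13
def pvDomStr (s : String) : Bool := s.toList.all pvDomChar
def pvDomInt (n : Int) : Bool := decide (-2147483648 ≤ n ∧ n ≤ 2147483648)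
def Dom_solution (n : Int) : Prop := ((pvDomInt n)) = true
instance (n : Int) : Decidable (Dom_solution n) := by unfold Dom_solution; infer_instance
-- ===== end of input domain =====

-- B replaces A's single-pass max/count state machine by strip-then-split-then-max
-- over the binary digit string; equivalence is proved for all Int inputs.


-- ===== PORT A =====
-- A's loop body: i == "0" increments count, any other char flushes count into max.
def stepA (st : Int × Int) (i : Char) : Int × Int :=
  if i = '0' then (st.1, st.2 + 1)
  else ((if st.2 > st.1 then st.2 else st.1), 0)

def solution (n : Int) : Int :=
  ((PySem.Int.toBinChars n).foldl stepA (0, 0)).1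

-- ===== PORT B =====
-- Source B: s = format(n,'b').strip('-0'); max(len(g) for g in s.split('1')) with default 0.
-- Python's max over the (nonempty) list of nonnegative lengths with default 0 is foldl max 0.
def solution_alt (n : Int) : Int :=
  ((PySem.Chars.splitOn (PySem.Chars.stripChars (PySem.Int.toBinChars n) ['-', '0']) ['1']).map
      (fun g => (g.length : Int))).foldl max 0

-- ===== PRECONDITION & SPEC =====
def Spec_solution (n : Int) (out : Int) : Prop := out = solution_alt n
instance (n : Int) (out : Int) : Decidable (Spec_solution n out) := by unfold Spec_solution; infer_instance

-- ===== CLAIM (what is proved, stated in full; the proofs are below) =====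
def Claim_equal_solution : Prop := ∀ (n : Int), Dom_solution n → Spec_solution n (solution n)

-- ===== LEMMAS AND PROOFS =====

-- simple structural model of s.split('1') at the char level
def sp : List Char → List (List Char)
  | [] => [[]]
  | c :: t => if c = '1' then [] :: sp t else (sp t).modifyHead (c :: ·)

lemma sp_ne_nil : ∀ l : List Char, sp l ≠ []
  | [] => by simp [sp]
  | c :: t => by
      have h := sp_ne_nil t
      simp only [sp]
      split
      · simp
      · cases hs : sp t with
        | nil => exact absurd hs h
        | cons g gs => simp [List.modifyHead]

lemma go_eq (fuel : Nat) : ∀ (l cur : List Char) (acc : List (List Char)), l.length ≤ fuel →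
    PySem.Chars.splitOn.go ['1'] fuel l cur acc
      = acc.reverse ++ (sp l).modifyHead (fun g => cur.reverse ++ g) := by
  induction fuel with
  | zero =>
    intro l cur acc h
    have hl : l = [] := List.eq_nil_of_length_eq_zero (Nat.le_zero.mp h)
    subst hl
    simp [PySem.Chars.splitOn.go, sp, List.modifyHead]
  | succ fuel ih =>
    intro l cur acc h
    cases l with
    | nil => simp [PySem.Chars.splitOn.go, sp, List.modifyHead]
    | cons c rest =>
      simp only [PySem.Chars.splitOn.go]
      by_cases hc : c = '1'
      · subst hc
        have hpre : (['1'] : List Char).isPrefixOf ('1' :: rest) = true := by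
          simp [List.isPrefixOf]
        rw [if_pos hpre]
        simp only [List.length, List.drop]
        rw [ih rest [] (cur.reverse :: acc) (by simpa using Nat.le_of_succ_le_succ h)]
        simp only [sp, reduceIte]
        cases hs : sp rest with
        | nil => exact absurd hs (sp_ne_nil rest)
        | cons g gs => simp [List.modifyHead]
      · have hpre : (['1'] : List Char).isPrefixOf (c :: rest) = false := by
          simp [List.isPrefixOf]
          exact fun hcc => absurd hcc.symm hc
        rw [if_neg (by simp [hpre])]
        rw [ih rest (c :: cur) acc (by simpa using Nat.le_of_succ_le_succ h)]
        simp only [sp, if_neg hc]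
        cases hs : sp rest with
        | nil => exact absurd hs (sp_ne_nil rest)
        | cons g gs => simp [List.modifyHead]

lemma splitOn_eq_sp (l : List Char) : PySem.Chars.splitOn l ['1'] = sp l := by
  unfold PySem.Chars.splitOn
  rw [go_eq (l.length + 1) l [] [] (by omega)]
  cases hs : sp l with
  | nil => exact absurd hs (sp_ne_nil l)
  | cons g gs => simp [List.modifyHead]

-- right-strip of the '0' characters
def rstrip0 : List Char → List Char
  | [] => []
  | c :: t =>
    match rstrip0 t with
    | [] => if c = '0' then [] else [c]
    | r => c :: r

lemma rstrip0_nil_of_not_mem : ∀ t : List Char, (∀ c ∈ t, c = '0' ∨ c = '1') → '1' ∉ t →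
    rstrip0 t = []
  | [], _, _ => rfl
  | c :: t, hb, hm => by
      have hc : c = '0' := by
        rcases hb c (by simp) with h | h
        · exact h
        · exact absurd (by simp [h]) hm
      have ht : rstrip0 t = [] :=
        rstrip0_nil_of_not_mem t (fun x hx => hb x (by simp [hx])) (fun hx => hm (by simp [hx]))
      simp [rstrip0, ht, hc]

lemma rstrip0_ne_nil_of_mem : ∀ t : List Char, '1' ∈ t → rstrip0 t ≠ []
  | c :: t, hm => by
      by_cases h1 : '1' ∈ t
      · have := rstrip0_ne_nil_of_mem t h1
        cases hr : rstrip0 t with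
        | nil => exact absurd hr this
        | cons r rs => simp [rstrip0, hr]
      · have hc : c = '1' := by
          rcases List.mem_cons.mp hm with h | h
          · exact h.symm
          · exact absurd h h1
        cases hr : rstrip0 t with
        | nil => simp [rstrip0, hr, hc]
        | cons r rs => simp [rstrip0, hr]

lemma dropWhile_rev : ∀ t : List Char, (∀ c ∈ t, c = '0' ∨ c = '1') →
    List.dropWhile (fun c => (['-', '0'] : List Char).contains c) t.reverse = (rstrip0 t).reverse := by
  intro t
  induction t with
  | nil => intro _; simp [rstrip0]
  | cons c t ih =>
    intro hb
    have hb' : ∀ x ∈ t, x = '0' ∨ x = '1' := fun x hx => hb x (by simp [hx])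
    have hc := hb c (by simp)
    rw [List.reverse_cons, List.dropWhile_append, ih hb']
    cases hr : rstrip0 t with
    | nil =>
      rcases hc with h | h <;> subst h <;> simp [rstrip0, hr, List.dropWhile]
    | cons r rs =>
      simp [rstrip0, hr]

lemma strip_bits (t : List Char) (hb : ∀ c ∈ t, c = '0' ∨ c = '1') :
    PySem.Chars.stripChars ('1' :: t) ['-', '0'] = '1' :: rstrip0 t := by
  simp only [PySem.Chars.stripChars]
  have h1 : List.dropWhile (fun c => (['-', '0'] : List Char).contains c) ('1' :: t) = '1' :: t := by
    simp [List.dropWhile]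
  rw [h1, List.reverse_cons, List.dropWhile_append, dropWhile_rev t hb]
  cases hr : rstrip0 t with
  | nil => simp [List.dropWhile]
  | cons r rs => simp

lemma strip_bits_neg (t : List Char) (hb : ∀ c ∈ t, c = '0' ∨ c = '1') :
    PySem.Chars.stripChars ('-' :: '1' :: t) ['-', '0'] = '1' :: rstrip0 t := by
  have h0 := strip_bits t hb
  simp only [PySem.Chars.stripChars, List.dropWhile] at h0 ⊢
  simpa using h0

lemma modifyHead_zero_add (l : List Int) : l.modifyHead (fun x => 0 + x) = l := by
  cases l <;> simp

-- the main invariant: A's fold from state (m, c) versus the split view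
lemma key : ∀ (t : List Char), (∀ c ∈ t, c = '0' ∨ c = '1') → ∀ (m c : Int), 0 ≤ m →
    (t.foldl stepA (m, c)).1 =
      if '1' ∈ t then
        List.foldl max m
          (((sp (rstrip0 t)).map (fun g => (g.length : Int))).modifyHead (fun x => c + x))
      else m := by
  intro t
  induction t with
  | nil => intro _ m c _; simp
  | cons d t ih =>
    intro hb m c hm
    have hb' : ∀ x ∈ t, x = '0' ∨ x = '1' := fun x hx => hb x (by simp [hx])
    rcases hb d (by simp) with hd | hd
    · subst hd
      have hstep : stepA (m, c) '0' = (m, c + 1) := by simp [stepA]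
      rw [List.foldl_cons, hstep]
      by_cases h1t : '1' ∈ t
      · rw [ih hb' m (c + 1) hm]
        have hmem : ('1' : Char) ∈ '0' :: t := by simp [h1t]
        rw [if_pos h1t, if_pos hmem]
        cases hr : rstrip0 t with
        | nil => exact absurd hr (rstrip0_ne_nil_of_mem t h1t)
        | cons r rs =>
          have hr0 : rstrip0 ('0' :: t) = '0' :: r :: rs := by simp [rstrip0, hr]
          rw [hr0]
          have hsp : sp ('0' :: r :: rs) = (sp (r :: rs)).modifyHead ('0' :: ·) := by
            simp [sp]
          rw [hsp]
          cases hs : sp (r :: rs) with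
          | nil => exact absurd hs (sp_ne_nil _)
          | cons g gs =>
            simp only [List.modifyHead, List.map_cons]
            congr 2
            push_cast [List.length_cons]
            ring
      · rw [ih hb' m (c + 1) hm]
        have hmem : ('1' : Char) ∉ '0' :: t := by simp [h1t]
        rw [if_neg h1t, if_neg hmem]
    · subst hd
      have hstep : stepA (m, c) '1' = (max m c, 0) := by
        have hmx : (if c > m then c else m) = max m c := by omega
        simp [stepA, hmx]
      rw [List.foldl_cons, hstep]
      have hmem : ('1' : Char) ∈ '1' :: t := by simp
      rw [if_pos hmem]
      have hr1 : rstrip0 ('1' :: t) = '1' :: rstrip0 t := by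
        cases hr : rstrip0 t with
        | nil => simp [rstrip0, hr]
        | cons r rs => simp [rstrip0, hr]
      rw [hr1]
      have hsp : sp ('1' :: rstrip0 t) = [] :: sp (rstrip0 t) := by simp [sp]
      rw [hsp]
      by_cases h1t : '1' ∈ t
      · rw [ih hb' (max m c) 0 (le_trans hm (le_max_left m c)), if_pos h1t,
          modifyHead_zero_add]
        simp only [List.map_cons, List.length_nil, Int.natCast_zero, List.modifyHead,
          List.foldl_cons]
        congr 1
        omega
      · rw [ih hb' (max m c) 0 (le_trans hm (le_max_left m c)), if_neg h1t]
        have hr0 : rstrip0 t = [] := rstrip0_nil_of_not_mem t hb' h1t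
        rw [hr0]
        simp only [sp, List.map_cons, List.map_nil, List.modifyHead, List.length_nil,
          Int.natCast_zero, List.foldl_cons, List.foldl_nil]
        omega

-- shape of Nat.toDigits 2 k for k ≠ 0: '1' followed by binary digits
lemma bits_shape : ∀ (fuel : Nat), ∀ (k : Nat) (ds : List Char), k ≠ 0 → k < 2 ^ fuel →
    ∃ t, Nat.toDigitsCore 2 fuel k ds = '1' :: (t ++ ds) ∧ ∀ c ∈ t, c = '0' ∨ c = '1' := by
  intro fuel
  induction fuel with
  | zero => intro k ds hk h; simp at h; omega
  | succ fuel ih =>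
    intro k ds hk h
    simp only [Nat.toDigitsCore]
    by_cases hq : k / 2 = 0
    · have hk1 : k = 1 := by omega
      subst hk1
      refine ⟨[], ?_, by simp⟩
      norm_num [Nat.digitChar]
    · rw [pow_succ] at h
      obtain ⟨t, ht, hbt⟩ := ih (k / 2) ((k % 2).digitChar :: ds) hq (by omega)
      rw [if_neg hq, ht]
      refine ⟨t ++ [(k % 2).digitChar], by simp, ?_⟩
      intro x hx
      rcases List.mem_append.mp hx with hx | hx
      · exact hbt x hx
      · have hx' : x = (k % 2).digitChar := by simpa using hx
        have h2 : k % 2 = 0 ∨ k % 2 = 1 := by omega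
        rcases h2 with h2 | h2 <;> rw [hx', h2]
        · left; rfl
        · right; rfl

lemma toBinChars_shape (n : Int) (hn : n ≠ 0) :
    ∃ t, (∀ c ∈ t, c = '0' ∨ c = '1') ∧
      PySem.Int.toBinChars n = (if n < 0 then ['-'] else []) ++ '1' :: t := by
  have hbits : ∀ k : Nat, k ≠ 0 → ∃ t, Nat.toDigits 2 k = '1' :: t ∧ ∀ c ∈ t, c = '0' ∨ c = '1' := by
    intro k hk
    have hlt : k < 2 ^ (k + 1) := lt_of_lt_of_le (Nat.lt_two_pow_self) (Nat.pow_le_pow_right (by omega) (by omega))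
    obtain ⟨t, ht, hbt⟩ := bits_shape (k + 1) k [] hk hlt
    exact ⟨t, by simpa [Nat.toDigits] using ht, hbt⟩
  by_cases hneg : n < 0
  · obtain ⟨t, ht, hbt⟩ := hbits n.natAbs (by omega)
    exact ⟨t, hbt, by simp [PySem.Int.toBinChars, hneg, ht]⟩
  · obtain ⟨t, ht, hbt⟩ := hbits n.toNat (by omega)
    exact ⟨t, hbt, by simp [PySem.Int.toBinChars, hneg, ht]⟩

-- ===== VERDICT (by name: the statement is the Claim_ definition above) =====
theorem solution_spec : Claim_equal_solution := by
  intro n _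
  unfold Spec_solution
  by_cases hn : n = 0
  · subst hn; decide
  · obtain ⟨t, hbt, heq⟩ := toBinChars_shape n hn
    -- A side
    have hA : solution n = (t.foldl stepA ((0 : Int), (0 : Int))).1 := by
      unfold solution
      rw [heq]
      by_cases hneg : n < 0 <;>
        simp [hneg, List.foldl_cons, stepA]
    -- B side
    have hstrip : PySem.Chars.stripChars (PySem.Int.toBinChars n) ['-', '0'] = '1' :: rstrip0 t := by
      rw [heq]
      by_cases hneg : n < 0
      · rw [if_pos hneg]; exact strip_bits_neg t hbt
      · rw [if_neg hneg]; exact strip_bits t hbt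
    have hB : solution_alt n =
        List.foldl max 0 ((sp (rstrip0 t)).map (fun g => (g.length : Int))) := by
      unfold solution_alt
      rw [hstrip, splitOn_eq_sp]
      have hsp : sp ('1' :: rstrip0 t) = [] :: sp (rstrip0 t) := by simp [sp]
      rw [hsp]
      simp
    rw [hA, hB, key t hbt 0 0 le_rfl]
    by_cases h1t : '1' ∈ t
    · rw [if_pos h1t, modifyHead_zero_add]
    · rw [if_neg h1t, rstrip0_nil_of_not_mem t hbt h1t]
      simp [sp]
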